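-- pv_equiv track=rewrite | github.com/GitDevla/AoC | 2016/day07/run.py | find_aba
-- ===== SOURCE A (Python) =====
-- def find_aba(input):
--     temp = []
--     for c in range(len(input)):
--         slice = input[c : 3 + c]
--         if len(slice) < 3:
--             continue
--         if slice[0] != slice[2]:  # XaX
--             continue
--         if slice[0] == slice[1]:  # XAx
--             continue
--         temp.append(slice)
--     return temp
-- ===== SOURCE B (Python) =====
-- def find_aba(input):
--     # Divide and conquer: split the string into two overlapping halves
--     # (2 chars of overlap so no window is lost), recurse, concatenate.
--     n = len(input)
--     if n < 3:
--         return []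
--     if n == 3:
--         if input[0] == input[2] and input[0] != input[1]:
--             return [input]
--         return []
--     m = n // 2 if n > 4 else 1
--     return find_aba(input[: m + 2]) + find_aba(input[m:])
-- ===== Notes on version B (the rewrite author's own statement) =====
-- stated objective: alternative
-- what changed: Replaces the single left-to-right index loop by a divide-and-conquer recursion that splits the string into two halves overlapping by 2 characters, solves each half recursively (base case: one 3-char window), and concatenates the results.
import Mathlib
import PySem

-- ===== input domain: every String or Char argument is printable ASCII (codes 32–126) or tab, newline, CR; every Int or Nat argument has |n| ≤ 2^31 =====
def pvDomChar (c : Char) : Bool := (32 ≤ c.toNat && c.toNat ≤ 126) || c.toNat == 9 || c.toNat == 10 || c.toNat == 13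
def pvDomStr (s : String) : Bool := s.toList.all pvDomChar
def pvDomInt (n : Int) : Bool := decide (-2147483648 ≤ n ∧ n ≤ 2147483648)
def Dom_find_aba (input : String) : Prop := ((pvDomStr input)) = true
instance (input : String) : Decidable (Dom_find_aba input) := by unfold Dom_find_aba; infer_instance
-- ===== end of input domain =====

-- B replaces A's index loop by a divide-and-conquer recursion on halves overlapping by 2 chars (alternative decomposition; same result).

-- ===== PORT A =====
def find_aba (input : String) : List String :=
  (PySem.List.pyRange 0 (input.toList.length : Int) 1).foldl
    (fun temp c =>
      let sl := PySem.List.slice input.toList (some c) (some (3 + c))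
      if sl.length < 3 then temp
      else if PySem.List.pyGet? sl 0 ≠ PySem.List.pyGet? sl 2 then temp
      else if PySem.List.pyGet? sl 0 = PySem.List.pyGet? sl 1 then temp
      else temp ++ [String.ofList sl])
    []

-- ===== PORT B =====
-- Source B's recursion on the string; slices input[:m+2] / input[m:] with nonnegative
-- bounds are List.take / List.drop exactly.
def abaGo (s : List Char) : List String :=
  if _h3 : s.length < 3 then []
  else if _hn : s.length = 3 then
    if PySem.List.pyGet? s 0 = PySem.List.pyGet? s 2 ∧ PySem.List.pyGet? s 0 ≠ PySem.List.pyGet? s 1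
    then [String.ofList s] else []
  else
    let m := if s.length > 4 then s.length / 2 else 1
    abaGo (s.take (m + 2)) ++ abaGo (s.drop m)
termination_by s.length
decreasing_by
  · simp only [List.length_take]
    split <;> omega
  · simp only [List.length_drop]
    split <;> omega

def find_aba_alt (input : String) : List String := abaGo input.toList

-- ===== PRECONDITION & SPEC =====
def Spec_find_aba (input : String) (out : List String) : Prop := out = find_aba_alt input
instance (input : String) (out : List String) : Decidable (Spec_find_aba input out) := by unfold Spec_find_aba; infer_instance

-- ===== CLAIM (what is proved, stated in full; the proofs are below) =====
def Claim_equal_find_aba : Prop := ∀ (input : String), Dom_find_aba input → Spec_find_aba input (find_aba input)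

-- ===== LEMMAS AND PROOFS =====

-- A's loop body, per index, as the list it contributes.
def abaAt (s : List Char) (k : Nat) : List String :=
  let sl := (s.drop k).take 3
  if sl.length < 3 then []
  else if PySem.List.pyGet? sl 0 ≠ PySem.List.pyGet? sl 2 then []
  else if PySem.List.pyGet? sl 0 = PySem.List.pyGet? sl 1 then []
  else [String.ofList sl]

def abaSpec (s : List Char) : List String :=
  (List.range s.length).flatMap (abaAt s)

lemma abaAt_of_short (s : List Char) (k : Nat) (h : s.length < k + 3) : abaAt s k = [] := by
  have h' : ((s.drop k).take 3).length < 3 := by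
    simp [List.length_take, List.length_drop]; omega
  simp only [abaAt]
  rw [if_pos h']

lemma abaSpec_short (s : List Char) (h : s.length < 3) : abaSpec s = [] := by
  rw [abaSpec, List.flatMap_eq_nil_iff]
  intro k hk
  exact abaAt_of_short s k (by omega)

lemma abaAt_take (s : List Char) (k j : Nat) (h : k + 3 ≤ j) :
    abaAt (s.take j) k = abaAt s k := by
  have : (s.take j).drop k = (s.drop k).take (j - k) := List.drop_take ..
  simp only [abaAt, this, List.take_take, Nat.min_eq_left (by omega : 3 ≤ j - k)]

lemma abaAt_drop (s : List Char) (m k : Nat) :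
    abaAt (s.drop m) k = abaAt s (m + k) := by
  simp [abaAt, List.drop_drop]

lemma abaSpec_split (s : List Char) (m : Nat) (hm : 1 ≤ m) (h : m + 2 ≤ s.length) :
    abaSpec s = abaSpec (s.take (m + 2)) ++ abaSpec (s.drop m) := by
  have hL : (s.take (m + 2)).length = m + 2 := by simp; omega
  have hR : (s.drop m).length = s.length - m := by simp
  -- left part: indices m and m+1 contribute nothing
  have hleft : abaSpec (s.take (m + 2)) = (List.range m).flatMap (abaAt s) := by
    rw [abaSpec, hL, show m + 2 = m + 1 + 1 from rfl, List.range_succ, List.range_succ]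
    rw [List.flatMap_append, List.flatMap_append]
    have e1 : abaAt (s.take (m + 2)) m = [] := abaAt_of_short _ _ (by omega)
    have e2 : abaAt (s.take (m + 2)) (m + 1) = [] := abaAt_of_short _ _ (by omega)
    rw [List.flatMap_singleton, List.flatMap_singleton, e1, e2]
    simp only [List.append_nil]
    unfold List.flatMap
    apply congrArg
    apply List.map_congr_left
    intro k hk
    exact abaAt_take s k (m + 2) (by have := List.mem_range.mp hk; omega)
  -- right part: shift indices by m
  have hright : abaSpec (s.drop m) = ((List.range (s.length - m)).map (m + ·)).flatMap (abaAt s) := by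
    rw [abaSpec, hR, List.flatMap_map]
    unfold List.flatMap
    apply congrArg
    apply List.map_congr_left
    intro k _
    exact abaAt_drop s m k
  rw [hleft, hright, ← List.flatMap_append, ← List.range_add]
  rw [abaSpec, show m + (s.length - m) = s.length by omega]

lemma abaGo_eq_spec (s : List Char) : abaGo s = abaSpec s := by
  generalize hN : s.length = N
  induction N using Nat.strong_induction_on generalizing s with
  | _ N ih =>
    subst hN
    rw [abaGo]
    by_cases h3 : s.length < 3
    · rw [dif_pos h3, abaSpec_short s h3]
    rw [dif_neg h3]
    by_cases hn : s.length = 3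
    · rw [dif_pos hn]
      match s, hn with
      | [a, b, c], _ =>
        by_cases hac : a = c <;> by_cases hab : a = b <;>
          simp [PySem.List.pyGet?, PySem.List.pyIdx?, abaSpec, List.range_succ, abaAt, hac, hab]
    · rw [dif_neg hn]
      simp only
      set m := if s.length > 4 then s.length / 2 else 1 with hm
      have hm1 : 1 ≤ m := by rw [hm]; split <;> omega
      have hm2 : m + 2 < s.length := by rw [hm]; split <;> omega
      rw [ih (s.take (m + 2)).length (by simp; omega) _ rfl,
          ih (s.drop m).length (by simp; omega) _ rfl]
      exact (abaSpec_split s m hm1 (by omega)).symm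

-- A-side: the fold equals abaSpec.
lemma find_aba_eq (input : String) : find_aba input = find_aba_alt input := by
  unfold find_aba find_aba_alt
  rw [abaGo_eq_spec]
  generalize input.toList = s
  have hstep : ∀ (acc : List String) (c : Int), c ∈ PySem.List.pyRange 0 (s.length : Int) 1 →
      (fun (temp : List String) (c : Int) =>
        let sl := PySem.List.slice s (some c) (some (3 + c))
        if sl.length < 3 then temp
        else if PySem.List.pyGet? sl 0 ≠ PySem.List.pyGet? sl 2 then temp
        else if PySem.List.pyGet? sl 0 = PySem.List.pyGet? sl 1 then temp
        else temp ++ [String.ofList sl]) acc c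
      = (fun (temp : List String) (c : Int) => temp ++ abaAt s c.toNat) acc c := by
    intro acc c hc
    rw [PySem.List.mem_pyRange_one] at hc
    obtain ⟨h0, hlt⟩ := hc
    have hcn : c = ((c.toNat : Nat) : Int) := by omega
    have hsl : PySem.List.slice s (some c) (some (3 + c)) = (s.drop c.toNat).take 3 := by
      rw [hcn, show (3 : Int) + ((c.toNat : Nat) : Int) = ((c.toNat : Nat) : Int) + ((3 : Nat) : Int) by push_cast; ring]
      exact PySem.List.slice_natCast_add s c.toNat 3
    simp only [abaAt, hsl]
    split_ifs <;> simp
  refine (PySem.List.foldl_congr_mem _ _ _ _ hstep).trans ?_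
  rw [PySem.List.foldl_append_eq_flatMap]
  rw [PySem.List.pyRange_one, List.flatMap_map]
  simp only [Int.toNat_natCast, Int.sub_zero, zero_add]
  rfl

-- ===== VERDICT (by name: the statement is the Claim_ definition above) =====
theorem find_aba_spec : Claim_equal_find_aba := by
  intro input _
  exact find_aba_eq input
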